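-- pv_equiv track=rewrite | github.com/a44056283-maker/EVEN_G2_glass_ui | data/remote-memory-cache/knowledge-strategy/edict_backup_20260417_092424/edict/dashboard/server.py | _compute_todos_summary
-- ===== SOURCE A (Python) =====
-- def _compute_todos_summary(todos):
--     """计算 todos 完成率汇总。"""
--     if not todos:
--         return None
--     total = len(todos)
--     completed = sum(1 for t in todos if t.get('status') == 'completed')
--     in_progress = sum(1 for t in todos if t.get('status') == 'in-progress')
--     not_started = total - completed - in_progress
--     percent = round(completed / total * 100) if total else 0
--     return {
--         'total': total,
--         'completed': completed,
--         'inProgress': in_progress,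
--         'notStarted': not_started,
--         'percent': percent,
--     }
-- ===== SOURCE B (Python) =====
-- def _compute_todos_summary(todos):
--     """计算 todos 完成率汇总。"""
--     if not todos:
--         return None
--     total = completed = in_progress = not_started = 0
--     for t in todos:
--         total += 1
--         s = t.get('status')
--         if s == 'completed':
--             completed += 1
--         elif s == 'in-progress':
--             in_progress += 1
--         else:
--             not_started += 1
--     return {
--         'total': total,
--         'completed': completed,
--         'inProgress': in_progress,
--         'notStarted': not_started,
--         'percent': round(completed / total * 100),
--     }
-- ===== Notes on version B (the rewrite author's own statement) =====
-- stated objective: alternative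
-- what changed: B makes a single classifying pass with four running counters (an if/elif/else branch per todo), counting total and notStarted directly, instead of A's len() plus two separate filtered generator scans and a subtraction for notStarted.
import Mathlib
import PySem

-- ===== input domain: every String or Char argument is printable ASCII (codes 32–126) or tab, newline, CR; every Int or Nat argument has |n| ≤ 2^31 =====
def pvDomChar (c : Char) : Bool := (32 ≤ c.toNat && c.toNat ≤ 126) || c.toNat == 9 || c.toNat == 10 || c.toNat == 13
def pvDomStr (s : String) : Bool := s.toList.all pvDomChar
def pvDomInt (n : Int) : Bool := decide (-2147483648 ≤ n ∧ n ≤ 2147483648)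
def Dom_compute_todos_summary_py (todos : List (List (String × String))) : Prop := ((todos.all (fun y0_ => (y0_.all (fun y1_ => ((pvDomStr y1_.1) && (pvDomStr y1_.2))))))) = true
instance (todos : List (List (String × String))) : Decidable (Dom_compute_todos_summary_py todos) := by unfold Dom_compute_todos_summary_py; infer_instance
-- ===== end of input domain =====

-- B replaces A's len() + two filtered scans + subtraction with one classifying pass holding
-- four running counters (notStarted counted directly); same return value.

-- Shared exact model of Python's `round(c / t * 100)` for 0 < t, 0 ≤ c (both Pythons contain this
-- exact expression): IEEE-754 double division c/t (round to nearest, ties to even, 53-bit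
-- significand), double multiplication by 100, then Python's round-half-to-even to int.
-- pvFDiv num den = (m, s) with the nearest double to num/den equal to m / 2^s, 2^52 ≤ m < 2^53.
def pvFDiv (num den : Nat) : Nat × Nat :=
  let s0 := 53 + PySem.Int.bitLength (den : Int) - PySem.Int.bitLength (num : Int)
  let s := if (num <<< s0) / den ≥ 2 ^ 53 then s0 - 1 else s0
  let q := (num <<< s) / den
  let r := (num <<< s) % den
  let m := if 2 * r > den then q + 1 else if 2 * r < den then q else if q % 2 = 0 then q else q + 1
  if m = 2 ^ 53 then (2 ^ 52, s - 1) else (m, s)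

def pvRoundPct (c t : Nat) : Int :=
  if c = 0 then 0
  else
    let p1 := pvFDiv c t
    let p2 := pvFDiv (p1.1 * 100) (1 <<< p1.2)
    let q := p2.1 >>> p2.2
    let r := p2.1 % (1 <<< p2.2)
    let half := 1 <<< (p2.2 - 1)
    ((if r > half then q + 1 else if r < half then q else if q % 2 = 0 then q else q + 1 : Nat) : Int)

-- Python dict value of the assoc-list argument (duplicate keys: last wins), then .get('status')
def pvStatus (t : List (String × String)) : Option String :=
  (PySem.Dict.ofList t).get? "status"

-- ===== PORT A =====
def compute_todos_summary_py (todos : List (List (String × String))) : Option (List (String × Int)) :=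
  if todos = [] then none
  else
    let total : Int := todos.length
    let completed : Int := (todos.map (fun t => if pvStatus t = some "completed" then (1 : Int) else 0)).sum
    let in_progress : Int := (todos.map (fun t => if pvStatus t = some "in-progress" then (1 : Int) else 0)).sum
    let not_started : Int := total - completed - in_progress
    let percent : Int := if total ≠ 0 then pvRoundPct completed.toNat total.toNat else 0
    some [("total", total), ("completed", completed), ("inProgress", in_progress),
          ("notStarted", not_started), ("percent", percent)]

-- ===== PORT B =====
-- one classifying pass: (total, completed, in_progress, not_started) updated per todo
def pvTallyStep (acc : Int × Int × Int × Int) (t : List (String × String)) : Int × Int × Int × Int :=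
  let s := pvStatus t
  if s = some "completed" then (acc.1 + 1, acc.2.1 + 1, acc.2.2.1, acc.2.2.2)
  else if s = some "in-progress" then (acc.1 + 1, acc.2.1, acc.2.2.1 + 1, acc.2.2.2)
  else (acc.1 + 1, acc.2.1, acc.2.2.1, acc.2.2.2 + 1)

def compute_todos_summary_py_alt (todos : List (List (String × String))) : Option (List (String × Int)) :=
  if todos = [] then none
  else
    let acc := todos.foldl pvTallyStep (0, 0, 0, 0)
    some [("total", acc.1), ("completed", acc.2.1), ("inProgress", acc.2.2.1),
          ("notStarted", acc.2.2.2), ("percent", pvRoundPct acc.2.1.toNat acc.1.toNat)]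

-- ===== PRECONDITION & SPEC =====
def Spec_compute_todos_summary_py (todos : List (List (String × String))) (out : Option (List (String × Int))) : Prop := out = compute_todos_summary_py_alt todos
instance (todos : List (List (String × String))) (out : Option (List (String × Int))) : Decidable (Spec_compute_todos_summary_py todos out) := by unfold Spec_compute_todos_summary_py; infer_instance

-- ===== CLAIM (what is proved, stated in full; the proofs are below) =====
def Claim_equal_compute_todos_summary_py : Prop := ∀ (todos : List (List (String × String))), Dom_compute_todos_summary_py todos → Spec_compute_todos_summary_py todos (compute_todos_summary_py todos)

-- ===== LEMMAS AND PROOFS =====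

-- A's 0/1-sum over a predicate on the status.
def pvSum (todos : List (List (String × String))) (k : String) : Int :=
  (todos.map (fun t => if pvStatus t = some k then (1 : Int) else 0)).sum

-- B's fold, run from an arbitrary start, adds A's three quantities componentwise
-- (not_started component gains length − completed-sum − in_progress-sum).
theorem pv_tally_fold (todos : List (List (String × String))) (a b c d : Int) :
    todos.foldl pvTallyStep (a, b, c, d)
      = (a + todos.length, b + pvSum todos "completed", c + pvSum todos "in-progress",
         d + (todos.length - pvSum todos "completed" - pvSum todos "in-progress")) := by
  induction todos generalizing a b c d with
  | nil => simp [pvSum]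
  | cons t ts ih =>
      by_cases h1 : pvStatus t = some "completed"
      · simp [pvTallyStep, h1, ih, pvSum]; and_intros <;> first | trivial | ring
      · by_cases h2 : pvStatus t = some "in-progress"
        · simp [pvTallyStep, h1, h2, ih, pvSum]; and_intros <;> first | trivial | ring
        · simp [pvTallyStep, h1, h2, ih, pvSum]; and_intros <;> first | trivial | ring

-- ===== VERDICT (by name: the statement is the Claim_ definition above) =====
theorem compute_todos_summary_py_spec : Claim_equal_compute_todos_summary_py := by
  intro todos _
  unfold Spec_compute_todos_summary_py compute_todos_summary_py compute_todos_summary_py_alt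
  by_cases h : todos = []
  · simp [h]
  · have hlen : (todos.length : Int) ≠ 0 := by
      simp only [ne_eq, Nat.cast_eq_zero, List.length_eq_zero_iff]; exact h
    simp only [h, if_false, pv_tally_fold, zero_add, hlen, ne_eq, not_false_eq_true, if_true]
    simp [pvSum]
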